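-- pv_equiv track=rewrite | github.com/Wahlord/AdventOfCode | 2023/07/code.py | is_5_of_a_kind
-- ===== SOURCE A (Python) =====
-- USE_JOKER = False
--
-- def is_5_of_a_kind(cards):
--     if USE_JOKER:
--         jokers = cards.count('J')
--         if jokers == 5:
--             return True
--         card = cards[0]
--         count = 1
--         while card == 'J' and count < len(cards):
--             card = cards[count]
--             count += 1
--         return 5 == jokers + cards.count(card)
--     return 5 == cards.count(cards[0])
-- ===== SOURCE B (Python) =====
-- # B: distinctness via a set instead of counting the first card; same return value on
-- # non-empty inputs outside the stated D_ region (A's first-card count can say True on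
-- # over-long hands); returns False on [] where A raises IndexError.
-- def is_5_of_a_kind(cards):
--     return len(cards) == 5 and len(set(cards)) == 1
-- ===== Notes on version B (the rewrite author's own statement) =====
-- stated objective: idiomatic
-- what changed: B tests 'exactly 5 cards, all identical' via len(cards)==5 and len(set(cards))==1 instead of A's count of the first card, so lists longer than 5 whose first card occurs exactly 5 times no longer count as five-of-a-kind, and B returns False on the empty list where A raises.
-- intended difference: On lists of length other than 5 whose first element occurs exactly 5 times, A returns True while B returns False; a five-of-a-kind hand must consist of exactly five equal cards, so B's value is the intended one. — e.g. on is_5_of_a_kind(["A", "A", "A", "A", "A", "B"]): A returns true, B returns false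
-- crash fix: On the empty list A raises IndexError via cards[0]; B returns False. — e.g. on is_5_of_a_kind([]): A raises IndexError, B returns false
import Mathlib
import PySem

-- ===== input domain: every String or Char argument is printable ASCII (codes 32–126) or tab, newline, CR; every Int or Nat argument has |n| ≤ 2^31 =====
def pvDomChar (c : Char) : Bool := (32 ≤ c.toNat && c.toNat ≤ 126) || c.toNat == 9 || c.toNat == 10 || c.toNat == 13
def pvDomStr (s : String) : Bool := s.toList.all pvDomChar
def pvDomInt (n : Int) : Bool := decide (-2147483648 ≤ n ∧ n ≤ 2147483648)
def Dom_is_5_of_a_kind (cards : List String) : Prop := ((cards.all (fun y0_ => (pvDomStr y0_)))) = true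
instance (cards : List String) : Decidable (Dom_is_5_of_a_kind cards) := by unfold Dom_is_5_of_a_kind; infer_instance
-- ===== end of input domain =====

-- B changes distinctness testing: 'exactly 5 cards, all identical' via a set, instead of counting the first card.

-- ===== PORT A =====
-- A: `return 5 == cards.count(cards[0])` (USE_JOKER is False, so only this line runs).
-- `cards[0]` raises IndexError on []; Pre_ excludes that input, the `none` branch is unreachable there.
def is_5_of_a_kind (cards : List String) : Bool :=
  match PySem.List.pyGet? cards 0 with
  | none => false
  | some c => decide ((5 : Int) = (PySem.List.count cards c : Int))

-- ===== PORT B =====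
-- B: `return len(cards) == 5 and len(set(cards)) == 1`
def is_5_of_a_kind_alt (cards : List String) : Bool :=
  decide (cards.length = 5) && decide (PySem.Set.len (PySem.Set.ofList cards) = 1)

-- ===== PRECONDITION & SPEC =====
-- Pre_ excludes exactly the empty list, on which A raises IndexError at cards[0].
def Pre_is_5_of_a_kind (cards : List String) : Prop := cards ≠ []
instance (cards : List String) : Decidable (Pre_is_5_of_a_kind cards) := by unfold Pre_is_5_of_a_kind; infer_instance
def pvWitness_is_5_of_a_kind : List String := ["A", "A", "A", "A", "A"]

-- On the empty list A raises IndexError via cards[0]; B returns False.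
def Raises_is_5_of_a_kind (cards : List String) : Prop := cards = []
instance (cards : List String) : Decidable (Raises_is_5_of_a_kind cards) := by unfold Raises_is_5_of_a_kind; infer_instance
def pvRaiseWitness_is_5_of_a_kind : List String := []
def pvRaiseWitnessOut_is_5_of_a_kind : Bool := false

-- On lists of length other than 5 whose first element occurs exactly 5 times, A returns True
-- while B returns False; a five-of-a-kind hand must be exactly five equal cards, so B's value is intended.
def D_is_5_of_a_kind (cards : List String) : Prop :=
  match cards with
  | [] => False
  | c :: _ => cards.length ≠ 5 ∧ cards.count c = 5
instance (cards : List String) : Decidable (D_is_5_of_a_kind cards) := by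
  unfold D_is_5_of_a_kind
  match cards with
  | [] => infer_instance
  | _ :: _ => infer_instance

def Spec_is_5_of_a_kind (cards : List String) (out : Bool) : Prop := ¬ D_is_5_of_a_kind cards → out = is_5_of_a_kind_alt cards
instance (cards : List String) (out : Bool) : Decidable (Spec_is_5_of_a_kind cards out) := by unfold Spec_is_5_of_a_kind; infer_instance

def pvDiffWitness_is_5_of_a_kind : List String := ["A", "A", "A", "A", "A", "B"]
def pvDiffWitnessOut_is_5_of_a_kind : Bool × Bool := (true, false)

-- ===== CLAIM (what is proved, stated in full; the proofs are below) =====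
def Claim_unchanged_is_5_of_a_kind : Prop := ∀ (cards : List String), Dom_is_5_of_a_kind cards → Pre_is_5_of_a_kind cards → Spec_is_5_of_a_kind cards (is_5_of_a_kind cards)
def Claim_changed_is_5_of_a_kind : Prop := Dom_is_5_of_a_kind (pvDiffWitness_is_5_of_a_kind) ∧ Pre_is_5_of_a_kind (pvDiffWitness_is_5_of_a_kind) ∧ D_is_5_of_a_kind (pvDiffWitness_is_5_of_a_kind) ∧ is_5_of_a_kind (pvDiffWitness_is_5_of_a_kind) = pvDiffWitnessOut_is_5_of_a_kind.1 ∧ is_5_of_a_kind_alt (pvDiffWitness_is_5_of_a_kind) = pvDiffWitnessOut_is_5_of_a_kind.2 ∧ pvDiffWitnessOut_is_5_of_a_kind.1 ≠ pvDiffWitnessOut_is_5_of_a_kind.2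
def Claim_exact_is_5_of_a_kind : Prop := ∀ (cards : List String), Dom_is_5_of_a_kind cards → Pre_is_5_of_a_kind cards → D_is_5_of_a_kind cards → is_5_of_a_kind cards ≠ is_5_of_a_kind_alt cards
def Claim_raises_is_5_of_a_kind : Prop := (∀ (cards : List String), Dom_is_5_of_a_kind cards → Raises_is_5_of_a_kind cards → ¬ Pre_is_5_of_a_kind cards) ∧ (Dom_is_5_of_a_kind (pvRaiseWitness_is_5_of_a_kind) ∧ Raises_is_5_of_a_kind (pvRaiseWitness_is_5_of_a_kind) ∧ is_5_of_a_kind_alt (pvRaiseWitness_is_5_of_a_kind) = pvRaiseWitnessOut_is_5_of_a_kind)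

-- ===== LEMMAS AND PROOFS =====

-- a nonempty list's distinct-element set has one element iff every element equals the head
theorem setlen_one_iff (c : String) (rest : List String) :
    List.length (PySem.Set.ofList (c :: rest)) = 1 ↔ ∀ b ∈ c :: rest, c = b := by
  constructor
  · intro h b hb
    have hmem : b ∈ PySem.Set.ofList (c :: rest) := (PySem.Set.mem_ofList _ _).mpr hb
    have hcm : c ∈ PySem.Set.ofList (c :: rest) := (PySem.Set.mem_ofList _ _).mpr (List.mem_cons_self ..)
    obtain ⟨a, ha⟩ := List.length_eq_one_iff.mp h
    rw [ha] at hmem hcm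
    simp only [List.mem_singleton] at hmem hcm
    rw [hcm, hmem]
  · intro h
    have hall : ∀ b ∈ PySem.Set.ofList (c :: rest), b = c := fun b hb =>
      (h b ((PySem.Set.mem_ofList _ _).mp hb)).symm
    have hcm : c ∈ PySem.Set.ofList (c :: rest) := (PySem.Set.mem_ofList _ _).mpr (List.mem_cons_self ..)
    have hnd : (PySem.Set.ofList (c :: rest)).Nodup := PySem.Set.nodup_ofList _
    cases hl : PySem.Set.ofList (c :: rest) with
    | nil => rw [hl] at hcm; simp at hcm
    | cons a t =>
      rw [hl] at hall hnd
      have ha : a = c := hall a (List.mem_cons_self ..)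
      have ht : t = [] := by
        rcases t with _ | ⟨x, t'⟩
        · rfl
        · have hx : x = c := hall x (by simp)
          simp [ha, hx] at hnd
      simp [ht]

theorem count_head_five_iff (c : String) (rest : List String) (h5 : (c :: rest).length = 5) :
    (c :: rest).count c = 5 ↔ ∀ b ∈ c :: rest, c = b := by
  rw [← h5]
  exact List.count_eq_length

theorem pyGet?_cons_zero (c : String) (rest : List String) :
    PySem.List.pyGet? (c :: rest) 0 = some c := by
  simp [PySem.List.pyGet?, PySem.List.pyIdx?]

-- ===== VERDICT (by name: the statement is the Claim_ definition above) =====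
theorem is_5_of_a_kind_spec : Claim_unchanged_is_5_of_a_kind := by
  intro cards _ hpre hnd
  match cards with
  | [] => exact absurd rfl hpre
  | c :: rest =>
    simp only [is_5_of_a_kind, is_5_of_a_kind_alt, pyGet?_cons_zero, PySem.List.count_eq]
    by_cases h5 : (c :: rest).length = 5
    · simp [h5]
      rw [setlen_one_iff, ← count_head_five_iff c rest h5, List.count_cons_self]
      omega
    · have hcnt' : List.count c rest + 1 ≠ 5 := by
        simpa [List.count_cons_self] using fun hc => hnd ⟨h5, hc⟩
      have h4 : rest.length ≠ 4 := by simp only [List.length_cons] at h5; omega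
      simp [h4]
      omega

theorem is_5_of_a_kind_changed : Claim_changed_is_5_of_a_kind := by
  unfold Claim_changed_is_5_of_a_kind; decide

theorem is_5_of_a_kind_tight : Claim_exact_is_5_of_a_kind := by
  intro cards _ hpre hd
  match cards with
  | [] => exact absurd rfl hpre
  | c :: rest =>
    obtain ⟨h5, hcnt⟩ := hd
    have hcnt' : List.count c rest + 1 = 5 := by simpa [List.count_cons_self] using hcnt
    simp only [is_5_of_a_kind, is_5_of_a_kind_alt, pyGet?_cons_zero, PySem.List.count_eq]
    simp only [List.length_cons] at h5 ⊢
    simp [hcnt', show ¬ (rest.length + 1 = 5) from h5]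

theorem is_5_of_a_kind_raises : Claim_raises_is_5_of_a_kind := by
  unfold Claim_raises_is_5_of_a_kind
  exact ⟨fun cards _ hr => by simp [Raises_is_5_of_a_kind] at hr; simp [hr, Pre_is_5_of_a_kind], by decide⟩

-- witness self-check: B's port really returns the stated value on the raise witness (extracted from the raises claim)
theorem pvRaiseWitness_value_ok : is_5_of_a_kind_alt pvRaiseWitness_is_5_of_a_kind = pvRaiseWitnessOut_is_5_of_a_kind :=
  is_5_of_a_kind_raises.2.2.2
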